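-- pv_equiv track=rewrite | github.com/haixiashi/kanjireadingmap | tools/reencode_da.py | encode_b93
-- ===== SOURCE A (Python) =====
-- def digit_to_char(d):
--     """Convert digit 0-92 to printable ASCII char, skipping \" and \\."""
--     if d >= 59:
--         d += 1  # skip \ (0x5C = 92, offset 60 from 0x20, but after " skip = 59)
--     if d >= 2:
--         d += 1  # skip " (0x22 = 34, offset 2 from 0x20)
--     return chr(d + 0x20)
--
-- def encode_b93(bits):
--     """Encode bit array to base-93 string. 85 bits -> 13 chars."""
--     P = 2 ** 32
--     while len(bits) % 85 != 0:
--         bits.append(0)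
--     chars = []
--     for i in range(0, len(bits), 85):
--         block = bits[i:i + 85]
--         hi = mi = lo = 0
--         for j in range(21):
--             hi = (hi << 1) | block[j]
--         for j in range(32):
--             mi = (mi << 1) | block[21 + j]
--         for j in range(32):
--             lo = (lo << 1) | block[53 + j]
--         digits = []
--         for _ in range(13):
--             r = hi % 93; hi = hi // 93
--             v = r * P + mi; r = v % 93; mi = v // 93
--             v = r * P + lo; r = v % 93; lo = v // 93
--             digits.append(r)
--         digits.reverse()
--         chars.extend(digit_to_char(d) for d in digits)
--     return ''.join(chars)
-- ===== SOURCE B (Python) =====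
-- def digit_to_char(d):
--     """Convert digit 0-92 to printable ASCII char, skipping \" and \\."""
--     if d >= 59:
--         d += 1  # skip \ (0x5C = 92, offset 60 from 0x20, but after " skip = 59)
--     if d >= 2:
--         d += 1  # skip " (0x22 = 34, offset 2 from 0x20)
--     return chr(d + 0x20)
--
-- def encode_b93(bits):
--     """Encode bit array to base-93 string. 85 bits -> 13 chars.
--
--     Same in-place zero padding of bits as the original; each block's 13
--     characters are produced by native bigint divmod, built back-to-front."""
--     P = 2 ** 32
--     while len(bits) % 85 != 0:
--         bits.append(0)
--     out = []
--     for i in range(0, len(bits), 85):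
--         block = bits[i:i + 85]
--         w1 = w2 = w3 = 0
--         for b in block[:21]:
--             w1 = (w1 << 1) | b
--         for b in block[21:53]:
--             w2 = (w2 << 1) | b
--         for b in block[53:]:
--             w3 = (w3 << 1) | b
--         n = (w1 * P + w2) * P + w3
--         piece = ''
--         for _ in range(13):
--             piece = digit_to_char(n % 93) + piece
--             n //= 93
--         out.append(piece)
--     return ''.join(out)
-- ===== Notes on version B (the rewrite author's own statement) =====
-- stated objective: simpler
-- what changed: Replaces the hand-carried three-word long division (carry chained through hi/mi/lo at every digit step) with a single native bigint n = (w1*2^32+w2)*2^32+w3 reduced by 13 plain n%93 / n//=93 steps, and builds each 13-char piece back-to-front by prepending, eliminating the digits list and its reverse().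
import Mathlib
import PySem

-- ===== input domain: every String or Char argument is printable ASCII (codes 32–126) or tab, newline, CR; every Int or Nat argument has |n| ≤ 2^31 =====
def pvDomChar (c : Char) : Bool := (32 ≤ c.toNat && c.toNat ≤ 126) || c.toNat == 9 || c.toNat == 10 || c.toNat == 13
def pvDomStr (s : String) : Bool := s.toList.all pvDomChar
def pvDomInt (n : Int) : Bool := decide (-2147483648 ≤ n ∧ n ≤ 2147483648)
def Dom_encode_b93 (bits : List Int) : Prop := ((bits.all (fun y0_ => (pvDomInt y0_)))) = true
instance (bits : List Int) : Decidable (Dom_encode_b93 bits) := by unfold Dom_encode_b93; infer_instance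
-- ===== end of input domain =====

-- B replaces the hand-carried three-word base-93 long division by one bigint
-- n = (w1*2^32+w2)*2^32+w3 reduced with plain n%93 / n//93, building each
-- 13-char piece back-to-front (no digits list, no reverse): simpler.
-- Both Pythons mutate `bits` in place (zero padding); equivalence here is about the return value.

-- ===== PORT A =====
-- shared module helper digit_to_char (only ever called on d in 0..92, so chr never raises)
def digitToChar (d : Int) : Char :=
  let d1 := if d ≥ 59 then d + 1 else d
  let d2 := if d1 ≥ 2 then d1 + 1 else d1
  Char.ofNat (d2 + 0x20).toNat

-- the shared `while len(bits) % 85 != 0: bits.append(0)` loop (textually identical in A and B);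
-- the Nat counter is only a totality fuel: 85 iterations always suffice and the loop always
-- exits through its own `len % 85 == 0` test
def padLoop : Nat → List Int → List Int
  | 0, bits => bits
  | k + 1, bits => if bits.length % 85 ≠ 0 then padLoop k (bits ++ [0]) else bits

def pad93 (bits : List Int) : List Int := padLoop 85 bits

def encode_b93 (bits : List Int) : String :=
  let P : Int := 2 ^ 32
  let bs := pad93 bits
  -- block[j] indices are always in range (each block has exactly 85 elements), so pyGetD is exact
  let chars := (PySem.List.pyRange 0 (PySem.List.len bs) 85).foldl (fun chars i =>
    let block := PySem.List.slice bs (some i) (some (i + 85))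
    let hi := (PySem.List.pyRange 0 21 1).foldl
      (fun hi j => PySem.Int.bor (hi <<< (1 : Nat)) (PySem.List.pyGetD block j 0)) 0
    let mi := (PySem.List.pyRange 0 32 1).foldl
      (fun mi j => PySem.Int.bor (mi <<< (1 : Nat)) (PySem.List.pyGetD block (21 + j) 0)) 0
    let lo := (PySem.List.pyRange 0 32 1).foldl
      (fun lo j => PySem.Int.bor (lo <<< (1 : Nat)) (PySem.List.pyGetD block (53 + j) 0)) 0
    let st := (PySem.List.pyRange 0 13 1).foldl (fun (st : Int × Int × Int × List Int) _ =>
      let hi := st.1; let mi := st.2.1; let lo := st.2.2.1; let ds := st.2.2.2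
      let r := PySem.Int.mod hi 93; let hi := PySem.Int.floordiv hi 93
      let v := r * P + mi; let r := PySem.Int.mod v 93; let mi := PySem.Int.floordiv v 93
      let v := r * P + lo; let r := PySem.Int.mod v 93; let lo := PySem.Int.floordiv v 93
      (hi, mi, lo, ds ++ [r])) (hi, mi, lo, ([] : List Int))
    chars ++ (st.2.2.2.reverse.map digitToChar)) ([] : List Char)
  String.ofList chars

-- ===== PORT B =====
def encode_b93_alt (bits : List Int) : String :=
  let P : Int := 2 ^ 32
  let bs := pad93 bits
  let out := (PySem.List.pyRange 0 (PySem.List.len bs) 85).foldl (fun out i =>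
    let block := PySem.List.slice bs (some i) (some (i + 85))
    let w1 := (PySem.List.slice block none (some 21)).foldl
      (fun w b => PySem.Int.bor (w <<< (1 : Nat)) b) 0
    let w2 := (PySem.List.slice block (some 21) (some 53)).foldl
      (fun w b => PySem.Int.bor (w <<< (1 : Nat)) b) 0
    let w3 := (PySem.List.slice block (some 53) none).foldl
      (fun w b => PySem.Int.bor (w <<< (1 : Nat)) b) 0
    let st := (PySem.List.pyRange 0 13 1).foldl (fun (st : List Char × Int) _ =>
      (digitToChar (PySem.Int.mod st.2 93) :: st.1, PySem.Int.floordiv st.2 93))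
      (([] : List Char), (w1 * P + w2) * P + w3)
    out ++ [st.1]) ([] : List (List Char))
  String.ofList out.flatten

-- ===== PRECONDITION & SPEC =====
def Spec_encode_b93 (bits : List Int) (out : String) : Prop := out = encode_b93_alt bits
instance (bits : List Int) (out : String) : Decidable (Spec_encode_b93 bits out) := by unfold Spec_encode_b93; infer_instance

-- ===== CLAIM (what is proved, stated in full; the proofs are below) =====
def Claim_equal_encode_b93 : Prop := ∀ (bits : List Int), Dom_encode_b93 bits → Spec_encode_b93 bits (encode_b93 bits)

-- ===== LEMMAS AND PROOFS =====

theorem padLoop_mod (k : Nat) : ∀ (bits : List Int),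
    (85 - bits.length % 85) % 85 ≤ k → (padLoop k bits).length % 85 = 0 := by
  induction k with
  | zero => intro bits h; simp only [padLoop]; omega
  | succ k ih =>
    intro bits h
    simp only [padLoop]
    split
    · apply ih
      simp only [List.length_append, List.length_cons, List.length_nil]
      omega
    · omega

theorem pad93_mod (bits : List Int) : (pad93 bits).length % 85 = 0 :=
  padLoop_mod 85 bits (by omega)


-- one step of A's three-word long division equals one bigint divmod step
theorem step_arith (hi mi lo : Int) :
    PySem.Int.mod (((hi * 2 ^ 32 + mi) * 2 ^ 32) + lo) 93 =
      PySem.Int.mod (PySem.Int.mod (PySem.Int.mod hi 93 * 2 ^ 32 + mi) 93 * 2 ^ 32 + lo) 93 ∧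
    PySem.Int.floordiv (((hi * 2 ^ 32 + mi) * 2 ^ 32) + lo) 93 =
      (PySem.Int.floordiv hi 93 * 2 ^ 32 + PySem.Int.floordiv (PySem.Int.mod hi 93 * 2 ^ 32 + mi) 93) * 2 ^ 32 +
        PySem.Int.floordiv (PySem.Int.mod (PySem.Int.mod hi 93 * 2 ^ 32 + mi) 93 * 2 ^ 32 + lo) 93 := by
  have h1 := PySem.Int.floordiv_mul_add_mod hi 93
  have h1a := PySem.Int.mod_nonneg hi (by norm_num : (0:Int) < 93)
  have h1b := PySem.Int.mod_lt hi (by norm_num : (0:Int) < 93)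
  have h2 := PySem.Int.floordiv_mul_add_mod (PySem.Int.mod hi 93 * 2 ^ 32 + mi) 93
  have h2a := PySem.Int.mod_nonneg (PySem.Int.mod hi 93 * 2 ^ 32 + mi) (by norm_num : (0:Int) < 93)
  have h2b := PySem.Int.mod_lt (PySem.Int.mod hi 93 * 2 ^ 32 + mi) (by norm_num : (0:Int) < 93)
  have h3 := PySem.Int.floordiv_mul_add_mod (PySem.Int.mod (PySem.Int.mod hi 93 * 2 ^ 32 + mi) 93 * 2 ^ 32 + lo) 93
  have h3a := PySem.Int.mod_nonneg (PySem.Int.mod (PySem.Int.mod hi 93 * 2 ^ 32 + mi) 93 * 2 ^ 32 + lo) (by norm_num : (0:Int) < 93)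
  have h3b := PySem.Int.mod_lt (PySem.Int.mod (PySem.Int.mod hi 93 * 2 ^ 32 + mi) 93 * 2 ^ 32 + lo) (by norm_num : (0:Int) < 93)
  have hV := PySem.Int.floordiv_mul_add_mod (((hi * 2 ^ 32 + mi) * 2 ^ 32) + lo) 93
  have hVa := PySem.Int.mod_nonneg (((hi * 2 ^ 32 + mi) * 2 ^ 32) + lo) (by norm_num : (0:Int) < 93)
  have hVb := PySem.Int.mod_lt (((hi * 2 ^ 32 + mi) * 2 ^ 32) + lo) (by norm_num : (0:Int) < 93)
  constructor <;> omega

-- A's index-window fold over pyRange equals the elementwise fold over the sublist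
theorem foldl_window (xs : List Int) (a k : Nat) (h : a + k ≤ xs.length)
    (f : Int → Int → Int) (acc : Int) :
    (PySem.List.pyRange 0 (k : Int) 1).foldl (fun s j => f s (PySem.List.pyGetD xs ((a : Int) + j) 0)) acc
      = ((xs.drop a).take k).foldl f acc := by
  induction k generalizing acc with
  | zero => simp [PySem.List.pyRange_one_eq_nil]
  | succ k ih =>
    have hk : a + k < xs.length := by omega
    have hsplit : PySem.List.pyRange 0 ((k + 1 : Nat) : Int) 1
        = PySem.List.pyRange 0 (k : Int) 1 ++ [(k : Int)] := by
      push_cast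
      exact PySem.List.pyRange_one_succ_right (by positivity)
    rw [hsplit, List.foldl_append, ih (by omega)]
    have htake : (xs.drop a).take (k + 1) = (xs.drop a).take k ++ [xs[a + k]] := by
      rw [List.take_add_one]
      have : (xs.drop a)[k]? = some xs[a + k] := by
        rw [List.getElem?_drop]
        exact List.getElem?_eq_getElem (by omega)
      simp [this]
    rw [htake, List.foldl_append]
    simp only [List.foldl_cons, List.foldl_nil]
    congr 1
    have : (a : Int) + (k : Int) = ((a + k : Nat) : Int) := by push_cast; ring
    rw [this, PySem.List.pyGetD_natCast]
    exact List.getD_eq_getElem _ _ hk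

-- the 13-step loops: A's three-word long division vs B's bigint divmod (chars built by prepending)
theorem divloop (l : List Int) :
    ∀ (hi mi lo : Int) (ds : List Int),
    (l.foldl (fun (st : List Char × Int) _ =>
        (digitToChar (PySem.Int.mod st.2 93) :: st.1, PySem.Int.floordiv st.2 93))
      (ds.reverse.map digitToChar, (hi * 2 ^ 32 + mi) * 2 ^ 32 + lo)).1
    = ((l.foldl (fun (st : Int × Int × Int × List Int) _ =>
        (PySem.Int.floordiv st.1 93,
         PySem.Int.floordiv (PySem.Int.mod st.1 93 * 2 ^ 32 + st.2.1) 93,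
         PySem.Int.floordiv (PySem.Int.mod (PySem.Int.mod st.1 93 * 2 ^ 32 + st.2.1) 93 * 2 ^ 32 + st.2.2.1) 93,
         st.2.2.2 ++ [PySem.Int.mod (PySem.Int.mod (PySem.Int.mod st.1 93 * 2 ^ 32 + st.2.1) 93 * 2 ^ 32 + st.2.2.1) 93]))
      (hi, mi, lo, ds)).2.2.2.reverse.map digitToChar) := by
  induction l with
  | nil => intro hi mi lo ds; rfl
  | cons x l ih =>
    intro hi mi lo ds
    simp only [List.foldl_cons]
    obtain ⟨hmod, hdiv⟩ := step_arith hi mi lo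
    have hacc : digitToChar (PySem.Int.mod ((hi * 2 ^ 32 + mi) * 2 ^ 32 + lo) 93)
        :: ds.reverse.map digitToChar
        = ((ds ++ [PySem.Int.mod ((hi * 2 ^ 32 + mi) * 2 ^ 32 + lo) 93]).reverse.map digitToChar) := by
      simp
    rw [hacc, hmod, hdiv]
    exact ih _ _ _ _

theorem flatMap_singleton_flatten (L : List Int) (fA fB : Int → List Char)
    (h : ∀ x ∈ L, fA x = fB x) :
    List.flatMap fA L = (List.flatMap (fun x => [fB x]) L).flatten := by
  induction L with
  | nil => simp
  | cons a t ih => simp_all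

-- ===== VERDICT (by name: the statement is the Claim_ definition above) =====
set_option maxRecDepth 8192 in
set_option maxHeartbeats 1600000 in
theorem encode_b93_spec : Claim_equal_encode_b93 := by
  intro bits _
  show encode_b93 bits = encode_b93_alt bits
  unfold encode_b93 encode_b93_alt
  simp only [PySem.List.foldl_append_eq_flatMap, List.nil_append]
  refine congrArg String.ofList (flatMap_singleton_flatten _ _ _ ?_)
  intro x hx
  dsimp only
  -- facts about the block
  have hmod := pad93_mod bits
  rw [PySem.List.len_eq] at hx
  rw [PySem.List.mem_pyRange_iff_of_pos (by norm_num)] at hx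
  obtain ⟨hx0, hxlt, hxdvd⟩ := hx
  rw [sub_zero] at hxdvd
  have hxn : x = (x.toNat : Int) := (Int.toNat_of_nonneg hx0).symm
  have hlen85 : x.toNat + 85 ≤ (pad93 bits).length := by omega
  have hslice : PySem.List.slice (pad93 bits) (some x) (some (x + 85))
      = ((pad93 bits).drop x.toNat).take 85 := by
    rw [PySem.List.slice_toNat _ hx0 (by omega)]
    congr 1
    omega
  set B : List Int := ((pad93 bits).drop x.toNat).take 85 with hB
  have hBlen : B.length = 85 := by
    simp [hB]
    omega
  rw [hslice]
  -- the three word folds agree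
  have h1 : (PySem.List.pyRange 0 21).foldl
      (fun hi j => PySem.Int.bor (hi <<< (1 : Nat)) (PySem.List.pyGetD B j 0)) 0
      = (B.take 21).foldl (fun w b => PySem.Int.bor (w <<< (1 : Nat)) b) 0 := by
    simpa using foldl_window B 0 21 (by omega) (fun w b => PySem.Int.bor (w <<< (1 : Nat)) b) 0
  have h2 : (PySem.List.pyRange 0 32).foldl
      (fun mi j => PySem.Int.bor (mi <<< (1 : Nat)) (PySem.List.pyGetD B (21 + j) 0)) 0
      = ((B.drop 21).take 32).foldl (fun w b => PySem.Int.bor (w <<< (1 : Nat)) b) 0 := by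
    simpa using foldl_window B 21 32 (by omega) (fun w b => PySem.Int.bor (w <<< (1 : Nat)) b) 0
  have h3 : (PySem.List.pyRange 0 32).foldl
      (fun lo j => PySem.Int.bor (lo <<< (1 : Nat)) (PySem.List.pyGetD B (53 + j) 0)) 0
      = ((B.drop 53).take 32).foldl (fun w b => PySem.Int.bor (w <<< (1 : Nat)) b) 0 := by
    simpa using foldl_window B 53 32 (by omega) (fun w b => PySem.Int.bor (w <<< (1 : Nat)) b) 0
  have hs1 : PySem.List.slice B none (some 21) = B.take 21 := by
    rw [PySem.List.slice_to B (by norm_num)]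
    rfl
  have hs2 : PySem.List.slice B (some 21) (some 53) = (B.drop 21).take 32 := by
    rw [PySem.List.slice_toNat B (by norm_num) (by norm_num)]
    rfl
  have hs3 : PySem.List.slice B (some 53) none = (B.drop 53).take 32 := by
    rw [PySem.List.slice_from B (by norm_num)]
    refine (List.take_of_length_le ?_).symm
    rw [List.length_drop, hBlen]
    decide
  simp only [h1, h2, h3, hs1, hs2, hs3]
  exact (divloop (PySem.List.pyRange 0 13)
    ((B.take 21).foldl (fun w b => PySem.Int.bor (w <<< (1 : Nat)) b) 0)
    (((B.drop 21).take 32).foldl (fun w b => PySem.Int.bor (w <<< (1 : Nat)) b) 0)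
    (((B.drop 53).take 32).foldl (fun w b => PySem.Int.bor (w <<< (1 : Nat)) b) 0) []).symm
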